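-- pv_equiv track=rewrite | github.com/Kokomben/AoC2020 | day20.py | mosterCondition
-- ===== SOURCE A (Python) =====
-- def mosterCondition(monster):
--     result = []
--     monsterRows = monster.split("\n")
--     for y, row in enumerate(monsterRows):
--         for x, char in enumerate(row):
--             if char == "#":
--                 result.append((y,x))
--     return result
-- ===== SOURCE B (Python) =====
-- def mosterCondition(monster):
--     result = []
--     y = 0
--     x = 0
--     for char in monster:
--         if char == "\n":
--             y += 1
--             x = 0
--         else:
--             if char == "#":
--                 result.append((y, x))
--             x += 1
--     return result
-- ===== Notes on version B (the rewrite author's own statement) =====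
-- stated objective: simpler
-- what changed: Replaced the split-into-rows plus nested enumerate loops by a single pass over the raw string that maintains row/column counters, resetting the column at each newline.
import Mathlib
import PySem

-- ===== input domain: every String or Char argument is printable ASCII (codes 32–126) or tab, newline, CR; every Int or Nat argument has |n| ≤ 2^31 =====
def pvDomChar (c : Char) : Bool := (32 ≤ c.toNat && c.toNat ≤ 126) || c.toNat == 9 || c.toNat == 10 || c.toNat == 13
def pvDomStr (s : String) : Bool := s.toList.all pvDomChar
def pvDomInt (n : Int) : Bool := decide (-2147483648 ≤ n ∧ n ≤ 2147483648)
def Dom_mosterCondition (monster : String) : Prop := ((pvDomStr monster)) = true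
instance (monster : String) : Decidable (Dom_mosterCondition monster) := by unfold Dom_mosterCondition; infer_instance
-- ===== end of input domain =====

-- B replaces A's split("\n") + nested enumerate loops by one pass over the raw
-- string with row/column counters (simpler decomposition, same O(n) cost).


-- ===== PORT A =====
-- monster.split("\n"); for y,row in enumerate(rows): for x,char in enumerate(row): if char == '#': append (y,x)
def mosterCondition (monster : String) : List (Int × Int) :=
  let monsterRows := PySem.Chars.splitOn monster.toList "\n".toList
  (PySem.List.enumerate monsterRows).foldl
    (fun result yrow =>
      (PySem.List.enumerate yrow.2).foldl
        (fun result xchar =>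
          if xchar.2 = '#' then result ++ [(yrow.1, xchar.1)] else result)
        result)
    []

-- ===== PORT B =====
-- one pass over the characters, maintaining y, x and the accumulated result
def mosterConditionAltGo : List Char → Int → Int → List (Int × Int) → List (Int × Int)
  | [], _, _, result => result
  | c :: rest, y, x, result =>
    if c = '\n' then mosterConditionAltGo rest (y + 1) 0 result
    else if c = '#' then mosterConditionAltGo rest y (x + 1) (result ++ [(y, x)])
    else mosterConditionAltGo rest y (x + 1) result

def mosterCondition_alt (monster : String) : List (Int × Int) :=
  mosterConditionAltGo monster.toList 0 0 []

-- ===== PRECONDITION & SPEC =====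
def Spec_mosterCondition (monster : String) (out : List (Int × Int)) : Prop := out = mosterCondition_alt monster
instance (monster : String) (out : List (Int × Int)) : Decidable (Spec_mosterCondition monster out) := by unfold Spec_mosterCondition; infer_instance

-- ===== CLAIM (what is proved, stated in full; the proofs are below) =====
def Claim_equal_mosterCondition : Prop := ∀ (monster : String), Dom_mosterCondition monster → Spec_mosterCondition monster (mosterCondition monster)

-- ===== LEMMAS AND PROOFS =====

-- hits of one row, chars `row` at row index `y`, columns starting at `x`
def pvInnerS (row : List Char) (y x : Int) : List (Int × Int) :=
  match row with
  | [] => []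
  | c :: rest => if c = '#' then (y, x) :: pvInnerS rest y (x + 1) else pvInnerS rest y (x + 1)

-- hits of a list of rows, row indices starting at `y`
def pvOuterS (rows : List (List Char)) (y : Int) : List (Int × Int) :=
  match rows with
  | [] => []
  | r :: rs => pvInnerS r y 0 ++ pvOuterS rs (y + 1)

-- structural single-pass spec (what B computes with empty accumulator)
def pvS (cs : List Char) (y x : Int) : List (Int × Int) :=
  match cs with
  | [] => []
  | c :: rest =>
    if c = '\n' then pvS rest (y + 1) 0
    else if c = '#' then (y, x) :: pvS rest y (x + 1)
    else pvS rest y (x + 1)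

-- split on '\n' with an explicit prefix accumulator (structural counterpart of Chars.splitOn)
def pvSplit1 (pre cs : List Char) : List (List Char) :=
  match cs with
  | [] => [pre]
  | c :: rest => if c = '\n' then pre :: pvSplit1 [] rest else pvSplit1 (pre ++ [c]) rest

theorem pvGo_eq_S (cs : List Char) : ∀ y x acc,
    mosterConditionAltGo cs y x acc = acc ++ pvS cs y x := by
  induction cs with
  | nil => intro y x acc; simp [mosterConditionAltGo, pvS]
  | cons c rest ih =>
    intro y x acc
    simp only [mosterConditionAltGo, pvS]
    split_ifs <;> simp [ih]

theorem pvInner_eq (row : List Char) : ∀ (y x : Int) acc,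
    (PySem.List.enumerate row x).foldl
      (fun result xchar => if xchar.2 = '#' then result ++ [(y, xchar.1)] else result) acc
    = acc ++ pvInnerS row y x := by
  induction row with
  | nil => intro y x acc; simp [PySem.List.enumerate_nil, pvInnerS]
  | cons c rest ih =>
    intro y x acc
    rw [PySem.List.enumerate_cons]
    simp only [List.foldl_cons, pvInnerS]
    by_cases hc : c = '#' <;> simp [hc, ih]

theorem pvOuter_eq (rows : List (List Char)) : ∀ (y : Int) acc,
    (PySem.List.enumerate rows y).foldl
      (fun result yrow =>
        (PySem.List.enumerate yrow.2).foldl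
          (fun result xchar => if xchar.2 = '#' then result ++ [(yrow.1, xchar.1)] else result)
          result) acc
    = acc ++ pvOuterS rows y := by
  induction rows with
  | nil => intro y acc; simp [PySem.List.enumerate_nil, pvOuterS]
  | cons r rs ih =>
    intro y acc
    rw [PySem.List.enumerate_cons]
    simp only [List.foldl_cons, pvOuterS]
    rw [pvInner_eq, ih, List.append_assoc]

theorem pvInnerS_append (p q : List Char) : ∀ (y x : Int),
    pvInnerS (p ++ q) y x = pvInnerS p y x ++ pvInnerS q y (x + p.length) := by
  induction p with
  | nil => intro y x; simp [pvInnerS]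
  | cons c rest ih =>
    intro y x
    simp only [List.cons_append, pvInnerS, List.length_cons]
    have : x + (↑rest.length + 1) = x + 1 + ↑rest.length := by ring
    by_cases hc : c = '#' <;> simp [hc, ih, this]

theorem pvOuter_split1 (cs : List Char) : ∀ (pre : List Char) (y : Int),
    pvOuterS (pvSplit1 pre cs) y = pvInnerS pre y 0 ++ pvS cs y pre.length := by
  induction cs with
  | nil => intro pre y; simp [pvSplit1, pvOuterS, pvS]
  | cons c rest ih =>
    intro pre y
    simp only [pvSplit1, pvS]
    by_cases hn : c = '\n'
    · simp [hn, pvOuterS, ih, pvInnerS]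
    · rw [if_neg hn, if_neg hn, ih, pvInnerS_append]
      simp only [pvInnerS, List.length_append, List.length_cons, List.length_nil]
      by_cases hc : c = '#' <;> simp [hc, add_comm]

-- Chars.splitOn.go with single-char separator '\n' computes pvSplit1 (fuel ≥ length)
theorem pvGoSplit_eq (l : List Char) : ∀ (fuel : Nat), l.length ≤ fuel → ∀ (cur : List Char) acc,
    PySem.Chars.splitOn.go ['\n'] fuel l cur acc = acc.reverse ++ pvSplit1 cur.reverse l := by
  induction l with
  | nil =>
    intro fuel _ cur acc
    cases fuel <;> simp [PySem.Chars.splitOn.go, pvSplit1]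
  | cons c rest ih =>
    intro fuel hf cur acc
    cases fuel with
    | zero => simp at hf
    | succ f =>
      simp only [PySem.Chars.splitOn.go]
      by_cases hn : c = '\n'
      · have hp : List.isPrefixOf ['\n'] (c :: rest) = true := by
          simp [List.isPrefixOf, hn]
        rw [if_pos hp]
        simp only [List.length_cons, List.drop_succ_cons, List.length_nil, List.drop_zero] at *
        rw [ih f (by omega)]
        simp [pvSplit1, hn]
      · have hp : List.isPrefixOf ['\n'] (c :: rest) = false := by
          simp only [List.isPrefixOf, Bool.and_eq_false_iff, beq_eq_false_iff_ne, ne_eq]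
          exact Or.inl fun h => hn h.symm
        rw [if_neg (by simp [hp])]
        simp only [List.length_cons] at hf
        rw [ih f (by omega)]
        simp [pvSplit1, hn]

theorem pvSplitOn_eq (cs : List Char) :
    PySem.Chars.splitOn cs ['\n'] = pvSplit1 [] cs := by
  show PySem.Chars.splitOn.go ['\n'] (cs.length + 1) cs [] [] = _
  rw [pvGoSplit_eq cs (cs.length + 1) (by omega)]
  simp

-- ===== VERDICT (by name: the statement is the Claim_ definition above) =====
theorem mosterCondition_spec : Claim_equal_mosterCondition := by
  intro monster _
  unfold Spec_mosterCondition mosterCondition mosterCondition_alt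
  have hsep : "\n".toList = ['\n'] := rfl
  rw [hsep, pvSplitOn_eq, pvOuter_eq, pvGo_eq_S]
  rw [pvOuter_split1]
  simp [pvInnerS]
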